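-- pv_equiv track=rewrite | github.com/JIHYEOK0801/study | Algorithm/python/test.py | calculate
-- ===== SOURCE A (Python) =====
-- def calculate(candidates, target, count):
-- 	if target in candidates:
-- 		return 0
--
-- 	temp = []
-- 	for candidate in candidates:
-- 		temp.append(candidate + 1)
-- 		temp.append(candidate - 1)
-- 		temp.append(candidate * 2)
--
-- 	count = calculate(temp, target, count + 1) + 1
-- 	return count
-- ===== SOURCE B (Python) =====
-- def calculate(candidates, target, count):
--     # Backward BFS from the target: the preimages of the forward ops
--     # v+1, v-1, v*2 are w-1, w+1 and w//2 (the latter only when w is even).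
--     # The k-th backward frontier is the set of values from which target is
--     # reachable in exactly k ops; the answer is the first level whose
--     # frontier meets the candidate set.
--     start = set(candidates)
--     frontier = {target}
--     level = 0
--     while start.isdisjoint(frontier):
--         nxt = set()
--         for w in frontier:
--             nxt.add(w - 1)
--             nxt.add(w + 1)
--             if w % 2 == 0:
--                 nxt.add(w // 2)
--         frontier = nxt
--         level += 1
--     return level
-- ===== Notes on version B (the rewrite author's own statement) =====
-- stated objective: alternative
-- what changed: Replaces A's forward recursion that materialises the full 3^k-element candidate multiset per level with a backward BFS from the target over the set of preimages (w-1, w+1, w//2 when even), returning the first level whose frontier meets set(candidates); intended as faster (a timing run saw A time out at n=16 where B returned, but could not verify a ratio), so no measured speed is claimed.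
import Mathlib
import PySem

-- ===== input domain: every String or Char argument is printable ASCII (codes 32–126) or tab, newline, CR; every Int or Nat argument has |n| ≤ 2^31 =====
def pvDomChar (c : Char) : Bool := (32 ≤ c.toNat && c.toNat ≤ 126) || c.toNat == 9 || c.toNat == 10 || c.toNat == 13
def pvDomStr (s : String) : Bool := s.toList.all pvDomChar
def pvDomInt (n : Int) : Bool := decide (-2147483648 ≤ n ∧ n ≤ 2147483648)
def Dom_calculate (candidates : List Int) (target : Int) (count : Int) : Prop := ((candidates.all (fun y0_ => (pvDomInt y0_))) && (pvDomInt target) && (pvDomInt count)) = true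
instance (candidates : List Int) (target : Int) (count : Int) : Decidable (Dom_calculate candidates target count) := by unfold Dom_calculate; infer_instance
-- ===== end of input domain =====

-- B replaces A's forward recursion over the 3^k-element candidate multiset by a backward
-- BFS from the target over the set of preimages (objective: alternative; intended as faster,
-- but a timing run could not verify a ratio, so no measured speed is claimed).
-- Both Python versions loop forever on empty candidates; in Lean both ports run on the same
-- provably sufficient fuel (|target - head| + 1), a pure termination device never exhausted on Pre_.

-- ===== PORT A =====
-- temp = []; for candidate in candidates: temp.append(c+1); temp.append(c-1); temp.append(c*2)
-- (flatMap builds the same list in the same order, one element-triple per candidate)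
def pvStepA (l : List Int) : List Int :=
  l.flatMap (fun c => [c + 1, c - 1, c * 2])

def pvFuelA : Nat → List Int → Int → Int → Int
  | 0, _, _, _ => 0
  | f + 1, cands, t, c =>
      if t ∈ cands then 0
      else pvFuelA f (pvStepA cands) t (c + 1) + 1

def calculate (candidates : List Int) (target : Int) (count : Int) : Int :=
  pvFuelA
    (match candidates with
     | [] => 0
     | x :: _ => (target - x).natAbs + 1)
    candidates target count

-- ===== PORT B =====
-- nxt = set(); for w in frontier: nxt.add(w-1); nxt.add(w+1); (if w % 2 == 0) nxt.add(w//2)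
def pvBack (s : PySem.Set Int) : PySem.Set Int :=
  s.foldl
    (fun nxt w =>
      let nxt' := PySem.Set.add (PySem.Set.add nxt (w - 1)) (w + 1)
      if PySem.Int.mod w 2 == 0 then PySem.Set.add nxt' (PySem.Int.floordiv w 2) else nxt')
    PySem.Set.empty

-- while start.isdisjoint(frontier): frontier = nxt; level += 1
def pvLoopB : Nat → PySem.Set Int → PySem.Set Int → Int → Int
  | 0, _, _, lvl => lvl
  | f + 1, start, frontier, lvl =>
      if PySem.Set.isdisjoint start frontier then
        pvLoopB f start (pvBack frontier) (lvl + 1)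
      else lvl

def calculate_alt (candidates : List Int) (target : Int) (count : Int) : Int :=
  pvLoopB
    (match candidates with
     | [] => 0
     | x :: _ => (target - x).natAbs + 1)
    (PySem.Set.ofList candidates) (PySem.Set.ofList [target]) 0

-- ===== PRECONDITION & SPEC =====
-- On empty candidates the Python A recurses forever (RecursionError) and B's while
-- loop never terminates; Pre_ excludes exactly that input.
def Pre_calculate (candidates : List Int) (target : Int) (count : Int) : Prop :=
  candidates ≠ []
instance (candidates : List Int) (target : Int) (count : Int) : Decidable (Pre_calculate candidates target count) := by unfold Pre_calculate; infer_instance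

def pvWitness_calculate : List Int × Int × Int := ([0, 5], 3, 0)

def Spec_calculate (candidates : List Int) (target : Int) (count : Int) (out : Int) : Prop := out = calculate_alt candidates target count
instance (candidates : List Int) (target : Int) (count : Int) (out : Int) : Decidable (Spec_calculate candidates target count out) := by unfold Spec_calculate; infer_instance

-- ===== CLAIM (what is proved, stated in full; the proofs are below) =====
def Claim_equal_calculate : Prop := ∀ (candidates : List Int) (target : Int) (count : Int), Dom_calculate candidates target count → Pre_calculate candidates target count → Spec_calculate candidates target count (calculate candidates target count)

-- ===== LEMMAS AND PROOFS =====

theorem pvWitness_ok :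
    Dom_calculate pvWitness_calculate.1 pvWitness_calculate.2.1 pvWitness_calculate.2.2 ∧
    Pre_calculate pvWitness_calculate.1 pvWitness_calculate.2.1 pvWitness_calculate.2.2 := by
  constructor <;> decide

theorem mem_stepA (l : List Int) (x : Int) :
    x ∈ pvStepA l ↔ ∃ v ∈ l, x = v + 1 ∨ x = v - 1 ∨ x = v * 2 := by
  unfold pvStepA
  simp only [List.mem_flatMap, List.mem_cons, List.not_mem_nil, or_false]

-- the backward step is adjoint to the forward one: u is a preimage of w iff w is an image of u
theorem pvBackRel (u w : Int) :
    (u = w - 1 ∨ u = w + 1 ∨ (PySem.Int.mod w 2 = 0 ∧ u = PySem.Int.floordiv w 2)) ↔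
      (w = u + 1 ∨ w = u - 1 ∨ w = u * 2) := by
  rw [show PySem.Int.mod w 2 = w % 2 from PySem.Int.mod_eq_emod_of_pos (by omega),
      show PySem.Int.floordiv w 2 = w / 2 from PySem.Int.floordiv_eq_ediv_of_pos (by omega)]
  omega

theorem mem_back_aux (s : List Int) (acc : PySem.Set Int) (x : Int) :
    x ∈ s.foldl
        (fun nxt w =>
          let nxt' := PySem.Set.add (PySem.Set.add nxt (w - 1)) (w + 1)
          if PySem.Int.mod w 2 == 0 then PySem.Set.add nxt' (PySem.Int.floordiv w 2) else nxt')
        acc ↔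
      x ∈ acc ∨ ∃ w ∈ s, x = w - 1 ∨ x = w + 1 ∨ (PySem.Int.mod w 2 = 0 ∧ x = PySem.Int.floordiv w 2) := by
  induction s generalizing acc with
  | nil => simp
  | cons c rest ih =>
      rw [List.foldl_cons, ih]
      have hstep : ∀ y : Int,
          (y ∈ (let nxt' := PySem.Set.add (PySem.Set.add acc (c - 1)) (c + 1)
                if PySem.Int.mod c 2 == 0 then PySem.Set.add nxt' (PySem.Int.floordiv c 2) else nxt')) ↔
            y ∈ acc ∨ (y = c - 1 ∨ y = c + 1 ∨ (PySem.Int.mod c 2 = 0 ∧ y = PySem.Int.floordiv c 2)) := by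
        intro y
        by_cases hc : (PySem.Int.mod c 2 == 0) = true
        · rw [beq_iff_eq] at hc
          simp only [hc, beq_self_eq_true, if_true, PySem.Set.mem_add]
          tauto
        · simp only [if_neg hc, PySem.Set.mem_add]
          rw [beq_iff_eq] at hc
          tauto
      rw [hstep x]
      simp only [List.mem_cons]
      constructor
      · rintro ((h | h) | ⟨w, hw, hx⟩)
        · exact Or.inl h
        · exact Or.inr ⟨c, Or.inl rfl, h⟩
        · exact Or.inr ⟨w, Or.inr hw, hx⟩
      · rintro (h | ⟨w, (rfl | hw), hx⟩)
        · exact Or.inl (Or.inl h)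
        · exact Or.inl (Or.inr hx)
        · exact Or.inr ⟨w, hw, hx⟩

theorem mem_back (s : PySem.Set Int) (x : Int) :
    x ∈ pvBack s ↔ ∃ w ∈ s, w = x + 1 ∨ w = x - 1 ∨ w = x * 2 := by
  unfold pvBack
  rw [mem_back_aux]
  simp only [PySem.Set.empty, List.not_mem_nil, false_or]
  exact exists_congr fun w => and_congr_right fun _ => pvBackRel x w

-- the adjunction lifted through j levels: the target is in the j-th forward level of l
-- iff some element of l is in the j-th backward level of {target}
theorem pvAdj (j : Nat) : ∀ (l : List Int) (t : Int),
    t ∈ pvStepA^[j] l ↔ ∃ v ∈ l, v ∈ pvBack^[j] (PySem.Set.ofList [t]) := by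
  induction j with
  | zero =>
      intro l t
      simp [PySem.Set.ofList, PySem.Set.add, PySem.Set.empty, PySem.Set.contains, eq_comm]
  | succ j ih =>
      intro l t
      rw [Function.iterate_succ_apply, ih (pvStepA l) t]
      rw [Function.iterate_succ_apply']
      constructor
      · rintro ⟨v, hv, hvB⟩
        rcases (mem_stepA l v).mp hv with ⟨u, hu, hrel⟩
        exact ⟨u, hu, (mem_back _ u).mpr ⟨v, hvB, by tauto⟩⟩
      · rintro ⟨u, hu, huB⟩
        rcases (mem_back _ u).mp huB with ⟨w, hwB, hrel⟩
        exact ⟨w, (mem_stepA l w).mpr ⟨u, hu, by tauto⟩, hwB⟩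

theorem loop_eq_fuel (f : Nat) (t : Int) :
    ∀ (l : List Int) (start s : PySem.Set Int) (c lvl : Int),
      (∀ j, t ∈ pvStepA^[j] l ↔ ∃ v ∈ start, v ∈ pvBack^[j] s) →
      pvLoopB f start s lvl = lvl + pvFuelA f l t c := by
  induction f with
  | zero => intro l start s c lvl _; simp [pvLoopB, pvFuelA]
  | succ f ih =>
      intro l start s c lvl hinv
      have h0 : t ∈ l ↔ ∃ v ∈ start, v ∈ s := by simpa using hinv 0
      simp only [pvLoopB, pvFuelA]
      by_cases ht : t ∈ l
      · rcases h0.mp ht with ⟨v, hv, hvs⟩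
        rw [if_neg (by
          intro hdisj
          exact (PySem.Set.isdisjoint_iff start s).mp hdisj v hv hvs), if_pos ht]
        ring
      · rw [if_pos ((PySem.Set.isdisjoint_iff start s).mpr
            (fun v hv hvs => ht (h0.mpr ⟨v, hv, hvs⟩))), if_neg ht]
        rw [ih (pvStepA l) start (pvBack s) (c + 1) (lvl + 1)
          (fun j => by
            have := hinv (j + 1)
            rwa [Function.iterate_succ_apply, Function.iterate_succ_apply] at this)]
        ring

-- ===== VERDICT (by name: the statement is the Claim_ definition above) =====
theorem calculate_spec : Claim_equal_calculate := by
  intro candidates target count _ _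
  unfold Spec_calculate calculate calculate_alt
  rw [loop_eq_fuel _ target candidates (PySem.Set.ofList candidates)
    (PySem.Set.ofList [target]) count 0
    (fun j => (pvAdj j candidates target).trans
      (exists_congr fun v => and_congr_left fun _ =>
        (PySem.Set.mem_ofList candidates v).symm))]
  ring
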